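-- pv_equiv track=rewrite | github.com/TavoGLC/DataAnalysisByExample | Farming/rainwater.py | VariableReserveWaterState
-- ===== SOURCE A (Python) =====
-- def VariableReserveWaterState(Reserve,WaterWeights,UsageWeights):
--     '''
--     Parameters
--     ----------
--     Reserve : int
--         size of the water reserve.
--     WaterWeights : list
--         list with the approximate harvested water.
--     UsageWeights : list
--         list with the approximate monthly water usage.
--
--     Returns
--     -------
--     container : list
--         contains the remaining water during each month of a water reserve of size
--         Reserve.
--
--     '''
--     remaning=Reserve
--     container=[]
--
--     for val,sal in zip(WaterWeights,UsageWeights):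
--
--         consumption=remaning-sal
--         if consumption+val>=Reserve:
--             remaning=Reserve
--         else:
--             remaning=consumption+val
--
--         container.append(remaning)
--
--     return container
-- ===== SOURCE B (Python) =====
-- def VariableReserveWaterState(Reserve, WaterWeights, UsageWeights):
--     # Closed form of the clamped recurrence: since the level is only ever
--     # clamped from above at Reserve, level_k = Reserve + S_k - max(0, S_1..S_k)
--     # where S is the prefix sum of the net inflows val - sal.
--     sums = []
--     t = 0
--     for val, sal in zip(WaterWeights, UsageWeights):
--         t += val - sal
--         sums.append(t)
--     maxes = []
--     m = 0
--     for s in sums: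
--         if s > m:
--             m = s
--         maxes.append(m)
--     return [Reserve + s - m for s, m in zip(sums, maxes)]
-- ===== Notes on version B (the rewrite author's own statement) =====
-- stated objective: alternative
-- what changed: Replaces A's single clamped fold (min-with-cap recurrence) by its closed form level_k = Reserve + S_k - max(0, S_1..S_k), computed in three staged passes: prefix sums of net inflow, running maximum, and a final combine.
import Mathlib
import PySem

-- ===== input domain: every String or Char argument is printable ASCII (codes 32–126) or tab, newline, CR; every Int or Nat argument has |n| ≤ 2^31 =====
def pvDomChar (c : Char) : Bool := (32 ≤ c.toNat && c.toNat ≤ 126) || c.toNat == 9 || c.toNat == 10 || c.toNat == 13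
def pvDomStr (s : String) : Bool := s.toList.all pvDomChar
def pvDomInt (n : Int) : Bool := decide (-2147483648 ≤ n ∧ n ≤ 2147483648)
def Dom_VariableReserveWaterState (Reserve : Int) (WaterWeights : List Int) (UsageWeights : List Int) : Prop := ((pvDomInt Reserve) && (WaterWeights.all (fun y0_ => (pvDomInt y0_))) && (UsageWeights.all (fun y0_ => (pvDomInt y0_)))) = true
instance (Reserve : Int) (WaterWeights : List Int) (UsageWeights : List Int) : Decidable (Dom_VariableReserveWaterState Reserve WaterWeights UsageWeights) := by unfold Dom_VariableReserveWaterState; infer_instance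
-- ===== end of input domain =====

-- B computes the clamped-reserve recurrence by its closed form Reserve + S_k - max(0, S_1..S_k)
-- in three staged passes (prefix sums, running max, combine); alternative algorithm, same cost.


-- ===== PORT A =====
-- literal transliteration: loop over zip with mutable (remaning, container)
def VariableReserveWaterState (Reserve : Int) (WaterWeights : List Int) (UsageWeights : List Int) : List Int :=
  let st := (WaterWeights.zip UsageWeights).foldl
    (fun (st : Int × List Int) (p : Int × Int) =>
      let remaning := st.1
      let consumption := remaning - p.2
      let remaning' := if consumption + p.1 ≥ Reserve then Reserve else consumption + p.1
      (remaning', st.2 ++ [remaning']))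
    (Reserve, [])
  st.2

-- ===== PORT B =====
-- pass 1: prefix sums of net inflow val - sal (loop with accumulator t, appending)
def pvNetPrefixSums (WaterWeights UsageWeights : List Int) : List Int :=
  ((WaterWeights.zip UsageWeights).foldl
    (fun (st : Int × List Int) (p : Int × Int) =>
      (st.1 + (p.1 - p.2), st.2 ++ [st.1 + (p.1 - p.2)]))
    (0, [])).2

-- pass 2: running maximum starting from m = 0 (loop with accumulator m, appending)
def pvRunningMax (sums : List Int) : List Int :=
  (sums.foldl
    (fun (st : Int × List Int) (s : Int) =>
      let m := if s > st.1 then s else st.1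
      (m, st.2 ++ [m]))
    (0, [])).2

-- pass 3: combine — Reserve + s - m for (s, m) in zip(sums, maxes)
def VariableReserveWaterState_alt (Reserve : Int) (WaterWeights : List Int) (UsageWeights : List Int) : List Int :=
  let sums := pvNetPrefixSums WaterWeights UsageWeights
  let maxes := pvRunningMax sums
  (sums.zip maxes).map (fun p => Reserve + p.1 - p.2)

-- ===== PRECONDITION & SPEC =====
def Spec_VariableReserveWaterState (Reserve : Int) (WaterWeights : List Int) (UsageWeights : List Int) (out : List Int) : Prop := out = VariableReserveWaterState_alt Reserve WaterWeights UsageWeights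
instance (Reserve : Int) (WaterWeights : List Int) (UsageWeights : List Int) (out : List Int) : Decidable (Spec_VariableReserveWaterState Reserve WaterWeights UsageWeights out) := by unfold Spec_VariableReserveWaterState; infer_instance

-- ===== CLAIM (what is proved, stated in full; the proofs are below) =====
def Claim_equal_VariableReserveWaterState : Prop := ∀ (Reserve : Int) (WaterWeights : List Int) (UsageWeights : List Int), Dom_VariableReserveWaterState Reserve WaterWeights UsageWeights → Spec_VariableReserveWaterState Reserve WaterWeights UsageWeights (VariableReserveWaterState Reserve WaterWeights UsageWeights)

-- ===== LEMMAS AND PROOFS =====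
-- clean recursive scans the three folds compute
def scanA (R acc : Int) : List (Int × Int) → List Int
  | [] => []
  | p :: t =>
    let a' := if acc - p.2 + p.1 ≥ R then R else acc - p.2 + p.1
    a' :: scanA R a' t

def scanSum (s : Int) : List (Int × Int) → List Int
  | [] => []
  | p :: t => (s + (p.1 - p.2)) :: scanSum (s + (p.1 - p.2)) t

def scanMax (m : Int) : List Int → List Int
  | [] => []
  | x :: t => (if x > m then x else m) :: scanMax (if x > m then x else m) t

lemma foldA_eq_scanA (R : Int) (l : List (Int × Int)) (acc : Int) (C : List Int) :
    (l.foldl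
      (fun (st : Int × List Int) (p : Int × Int) =>
        let remaning := st.1
        let consumption := remaning - p.2
        let remaning' := if consumption + p.1 ≥ R then R else consumption + p.1
        (remaning', st.2 ++ [remaning']))
      (acc, C)).2 = C ++ scanA R acc l := by
  induction l generalizing acc C with
  | nil => simp [scanA]
  | cons p t ih => simp [scanA, ih]

lemma foldSum_eq_scanSum (l : List (Int × Int)) (s : Int) (C : List Int) :
    (l.foldl
      (fun (st : Int × List Int) (p : Int × Int) =>
        (st.1 + (p.1 - p.2), st.2 ++ [st.1 + (p.1 - p.2)]))
      (s, C)).2 = C ++ scanSum s l := by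
  induction l generalizing s C with
  | nil => simp [scanSum]
  | cons p t ih => simp [scanSum, ih]

lemma foldMax_eq_scanMax (xs : List Int) (m : Int) (C : List Int) :
    (xs.foldl
      (fun (st : Int × List Int) (s : Int) =>
        let m' := if s > st.1 then s else st.1
        (m', st.2 ++ [m']))
      (m, C)).2 = C ++ scanMax m xs := by
  induction xs generalizing m C with
  | nil => simp [scanMax]
  | cons x t ih => simp [scanMax, ih]

lemma scanA_closed_form (R : Int) (l : List (Int × Int)) (s m : Int) :
    scanA R (R + s - m) l
      = ((scanSum s l).zip (scanMax m (scanSum s l))).map (fun p => R + p.1 - p.2) := by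
  induction l generalizing s m with
  | nil => simp [scanA, scanSum, scanMax]
  | cons p t ih =>
    simp only [scanA, scanSum, scanMax]
    set s' := s + (p.1 - p.2) with hs'
    have hhead : (if R + s - m - p.2 + p.1 ≥ R then R else R + s - m - p.2 + p.1)
        = R + s' - (if s' > m then s' else m) := by
      split_ifs <;> omega
    rw [hhead]
    have := ih s' (if s' > m then s' else m)
    simp [List.zip, this]

-- ===== VERDICT (by name: the statement is the Claim_ definition above) =====
theorem VariableReserveWaterState_spec : Claim_equal_VariableReserveWaterState := by
  intro R w u _
  unfold Spec_VariableReserveWaterState VariableReserveWaterState VariableReserveWaterState_alt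
    pvNetPrefixSums pvRunningMax
  simp only [foldA_eq_scanA, foldSum_eq_scanSum, foldMax_eq_scanMax, List.nil_append]
  simpa using scanA_closed_form R (w.zip u) 0 0
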